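-- pv_equiv track=rewrite | github.com/iaoongin/coinx | src/coinx/collector/exchange_repair.py | _group_contiguous_times
-- ===== SOURCE A (Python) =====
-- def _period_to_ms(period):
--     if period.endswith('m'):
--         return int(period[:-1]) * 60 * 1000
--     if period.endswith('h'):
--         return int(period[:-1]) * 60 * 60 * 1000
--     if period.endswith('H'):
--         return int(period[:-1]) * 60 * 60 * 1000
--     if period.endswith('d'):
--         return int(period[:-1]) * 24 * 60 * 60 * 1000
--     if period.endswith('D'):
--         return int(period[:-1]) * 24 * 60 * 60 * 1000
--     raise ValueError(f'unsupported repair period: {period}')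
--
-- def _group_contiguous_times(times, period='5m'):
--     period_ms = _period_to_ms(period)
--     groups = []
--     for timestamp in sorted(set(times)):
--         if not groups or timestamp != groups[-1][-1] + period_ms:
--             groups.append([timestamp])
--         else:
--             groups[-1].append(timestamp)
--     return groups
-- ===== SOURCE B (Python) =====
-- def _period_to_ms(period):
--     if period.endswith('m'):
--         return int(period[:-1]) * 60 * 1000
--     if period.endswith('h'):
--         return int(period[:-1]) * 60 * 60 * 1000
--     if period.endswith('H'):
--         return int(period[:-1]) * 60 * 60 * 1000
--     if period.endswith('d'):
--         return int(period[:-1]) * 24 * 60 * 60 * 1000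
--     if period.endswith('D'):
--         return int(period[:-1]) * 24 * 60 * 60 * 1000
--     raise ValueError(f'unsupported repair period: {period}')
--
-- def _group_contiguous_times(times, period='5m'):
--     period_ms = _period_to_ms(period)
--     s = sorted(set(times))
--     groups = []
--     i, n = 0, len(s)
--     while i < n:
--         j = i + 1
--         while j < n and s[j] == s[j - 1] + period_ms:
--             j += 1
--         groups.append(s[i:j])
--         i = j
--     return groups
-- ===== Notes on version B (the rewrite author's own statement) =====
-- stated objective: alternative
-- what changed: Replaces A's accumulator loop that appends each timestamp to the last group with a two-pointer scan that slices one maximal contiguous run at a time off the sorted distinct list.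
-- outside the precondition, e.g. on _group_contiguous_times([0], 'x'): A raises ValueError, B raises ValueError
import Mathlib
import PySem

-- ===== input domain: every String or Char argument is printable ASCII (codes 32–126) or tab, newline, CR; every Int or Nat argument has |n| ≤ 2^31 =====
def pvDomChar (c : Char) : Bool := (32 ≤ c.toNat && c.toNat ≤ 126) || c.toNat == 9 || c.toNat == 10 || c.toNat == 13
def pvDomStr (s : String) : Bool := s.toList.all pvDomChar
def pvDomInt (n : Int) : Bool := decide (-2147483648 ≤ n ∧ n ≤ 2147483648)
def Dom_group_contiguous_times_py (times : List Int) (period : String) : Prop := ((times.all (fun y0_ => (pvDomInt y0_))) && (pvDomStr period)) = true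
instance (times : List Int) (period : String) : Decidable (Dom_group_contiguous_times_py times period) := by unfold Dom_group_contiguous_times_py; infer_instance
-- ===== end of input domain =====

-- B differs from A by decomposition: instead of appending each timestamp to the last group of an
-- accumulator, B walks the sorted distinct list with two pointers and slices off one maximal
-- contiguous run at a time.

-- shared helper: _period_to_ms (same module helper both Pythons call); none = ValueError
def periodToMs (period : String) : Option Int :=
  if PySem.Str.endswith period "m" then
    (PySem.Int.ofStr? (PySem.Str.slice period none (some (-1)))).map (fun n => n * 60 * 1000)
  else if PySem.Str.endswith period "h" then
    (PySem.Int.ofStr? (PySem.Str.slice period none (some (-1)))).map (fun n => n * 60 * 60 * 1000)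
  else if PySem.Str.endswith period "H" then
    (PySem.Int.ofStr? (PySem.Str.slice period none (some (-1)))).map (fun n => n * 60 * 60 * 1000)
  else if PySem.Str.endswith period "d" then
    (PySem.Int.ofStr? (PySem.Str.slice period none (some (-1)))).map (fun n => n * 24 * 60 * 60 * 1000)
  else if PySem.Str.endswith period "D" then
    (PySem.Int.ofStr? (PySem.Str.slice period none (some (-1)))).map (fun n => n * 24 * 60 * 60 * 1000)
  else none

-- ===== PORT A =====
-- one iteration of A's loop: append [t] as a new group, or append t to the last group
def stepA (p : Int) (groups : List (List Int)) (t : Int) : List (List Int) :=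
  match groups.getLast? with
  | none => groups ++ [[t]]                    -- `not groups`
  | some g =>
    match g.getLast? with
    | none => groups ++ [[t]]                  -- unreachable: groups[-1] is never empty
    | some v =>
      if t ≠ v + p then groups ++ [[t]]
      else groups.dropLast ++ [g ++ [t]]       -- groups[-1].append(timestamp)

def group_contiguous_times_py (times : List Int) (period : String) : List (List Int) :=
  match periodToMs period with
  | none => []                                 -- ValueError; outside Pre_
  | some p =>
    (PySem.List.sorted (PySem.Set.ofList times) (fun x => x) false).foldl (stepA p) []

-- ===== PORT B =====
-- inner while loop: consume the run continuing from prev (returns the run and the remainder)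
def takeRun (p : Int) (prev : Int) : List Int → List Int × List Int
  | [] => ([], [])
  | y :: ys =>
    if y = prev + p then
      let pr := takeRun p y ys
      (y :: pr.1, pr.2)
    else ([], y :: ys)

theorem takeRun_rest_length (p prev : Int) (l : List Int) :
    (takeRun p prev l).2.length ≤ l.length := by
  induction l generalizing prev with
  | nil => simp [takeRun]
  | cons y ys ih =>
    simp only [takeRun]
    split
    · exact le_trans (ih y) (Nat.le_succ _)
    · simp

-- outer while loop: slice off one maximal contiguous run at a time
def chunk (p : Int) : List Int → List (List Int)
  | [] => []
  | x :: xs =>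
    (x :: (takeRun p x xs).1) :: chunk p (takeRun p x xs).2
termination_by l => l.length
decreasing_by
  exact Nat.lt_succ_of_le (takeRun_rest_length p x xs)

def group_contiguous_times_py_alt (times : List Int) (period : String) : List (List Int) :=
  match periodToMs period with
  | none => []
  | some p =>
    chunk p (PySem.List.sorted (PySem.Set.ofList times) (fun x => x) false)

-- ===== PRECONDITION & SPEC =====
-- Pre_ excludes exactly the periods on which _period_to_ms raises ValueError
-- (no m/h/H/d/D suffix, or a prefix int() rejects); B raises there too.
def Pre_group_contiguous_times_py (times : List Int) (period : String) : Prop :=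
  (PySem.Str.endswith period "m" = true ∨ PySem.Str.endswith period "h" = true ∨
   PySem.Str.endswith period "H" = true ∨ PySem.Str.endswith period "d" = true ∨
   PySem.Str.endswith period "D" = true) ∧
  (PySem.Int.ofStr? (PySem.Str.slice period none (some (-1)))).isSome = true

instance (times : List Int) (period : String) : Decidable (Pre_group_contiguous_times_py times period) := by
  unfold Pre_group_contiguous_times_py; infer_instance

def pvWitness_group_contiguous_times_py : List Int × String := ([0, 300000, 900000], "5m")

def Spec_group_contiguous_times_py (times : List Int) (period : String) (out : List (List Int)) : Prop := out = group_contiguous_times_py_alt times period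
instance (times : List Int) (period : String) (out : List (List Int)) : Decidable (Spec_group_contiguous_times_py times period out) := by unfold Spec_group_contiguous_times_py; infer_instance

-- ===== CLAIM (what is proved, stated in full; the proofs are below) =====
def Claim_equal_group_contiguous_times_py : Prop := ∀ (times : List Int) (period : String), Dom_group_contiguous_times_py times period → Pre_group_contiguous_times_py times period → Spec_group_contiguous_times_py times period (group_contiguous_times_py times period)

-- ===== LEMMAS AND PROOFS =====

theorem chunk_nil (p : Int) : chunk p [] = [] := by
  rw [chunk]

theorem chunk_cons (p x : Int) (xs : List Int) :
    chunk p (x :: xs) = (x :: (takeRun p x xs).1) :: chunk p (takeRun p x xs).2 := by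
  rw [chunk]

-- A's fold from an accumulator whose last group ends in v equals: extend that group by the run
-- continuing from v, then chunk the remainder.
theorem foldA_last (p : Int) (l : List Int) :
    ∀ (gs : List (List Int)) (g : List Int) (v : Int),
      l.foldl (stepA p) (gs ++ [g ++ [v]]) =
        gs ++ ((g ++ [v]) ++ (takeRun p v l).1) :: chunk p (takeRun p v l).2 := by
  induction l with
  | nil => intro gs g v; simp [takeRun, chunk_nil]
  | cons t l' ih =>
    intro gs g v
    have hstep : stepA p (gs ++ [g ++ [v]]) t =
        if t = v + p then gs ++ [(g ++ [v]) ++ [t]] else (gs ++ [g ++ [v]]) ++ [[t]] := by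
      simp only [stepA, List.getLast?_append_cons]
      by_cases h : t = v + p <;> simp [h]
    simp only [List.foldl_cons, hstep]
    by_cases h : t = v + p
    · simp only [if_pos h]
      have := ih gs (g ++ [v]) t
      rw [show gs ++ [g ++ [v] ++ [t]] = gs ++ [(g ++ [v]) ++ [t]] from rfl, this]
      simp [takeRun, h, List.append_assoc]
    · simp only [if_neg h]
      have := ih (gs ++ [g ++ [v]]) [] t
      simp only [List.nil_append] at this
      rw [this]
      simp [takeRun, h, chunk_cons, List.append_assoc]

theorem foldA_eq_chunk (p : Int) (l : List Int) :
    l.foldl (stepA p) [] = chunk p l := by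
  cases l with
  | nil => simp [chunk_nil]
  | cons x xs =>
    have hstep : stepA p [] x = [[x]] := by simp [stepA]
    simp only [List.foldl_cons, hstep]
    have := foldA_last p xs [] [] x
    simp only [List.nil_append] at this
    rw [this, chunk_cons]
    simp

-- ===== VERDICT (by name: the statement is the Claim_ definition above) =====
theorem group_contiguous_times_py_spec : Claim_equal_group_contiguous_times_py := by
  intro times period _ _
  unfold Spec_group_contiguous_times_py group_contiguous_times_py group_contiguous_times_py_alt
  cases periodToMs period with
  | none => rfl
  | some p => exact foldA_eq_chunk p _
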